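-- pv_equiv track=rewrite | github.com/techiemaya-fze/lad-feature-voag-pipeline | api/middleware.py | _get_endpoint_tier
-- ===== SOURCE A (Python) =====
-- ENDPOINT_TIERS: dict[str, str] = {
--     # Health and status - exempt from auth but rate limited
--     "/": "high",
--     "/healthz": "high",
--     "/security/status": "high",
--     # High frequency
--     "/recordings/signed-url": "high",
--     "/recordings/calls/": "high",  # Prefix match
--     "/auth/status": "high",
--     "/auth/microsoft/status": "high",
--     # Standard
--     "/calls": "standard",
--     "/calls/batch": "standard",
--     "/ui/sessions": "standard",
--     "/auth/microsoft/list-businesses": "standard",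
--     "/auth/microsoft/list-services": "standard",
--     # Sensitive - Google
--     "/auth/google/start": "sensitive",
--     "/auth/google/callback": "sensitive",  # Exempt from auth (OAuth callback)
--     "/auth/revoke": "sensitive",
--     "/agent/schedule": "sensitive",
--     "/agent/email": "sensitive",
--     # Sensitive - Microsoft
--     "/auth/microsoft/start": "sensitive",
--     "/auth/microsoft/callback": "sensitive",  # Exempt from auth (OAuth callback)
--     "/auth/microsoft/revoke": "sensitive",
--     "/auth/microsoft/save-config": "sensitive",
-- }
--
-- def _get_endpoint_tier(path: str) -> str:
--     """Determine the rate limit tier for a given endpoint path."""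
--     # Check exact match first
--     if path in ENDPOINT_TIERS:
--         return ENDPOINT_TIERS[path]
--     # Check prefix matches
--     for prefix, tier in ENDPOINT_TIERS.items():
--         if prefix.endswith("/") and path.startswith(prefix):
--             return tier
--     # Check if path starts with a known base
--     for prefix, tier in ENDPOINT_TIERS.items():
--         if path.startswith(prefix.rstrip("/")):
--             return tier
--     return "standard"
-- ===== SOURCE B (Python) =====
-- # B: classify by tier groups (membership in two frozensets, default "high")
-- # instead of a dict walk with prefix loops. Correct because A's prefix loops are
-- # dead for the default: the first key "/" (and its rstrip to "") makes every
-- # non-exact path resolve to "high", so only the non-"high" exact keys matter.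
--
-- _SENSITIVE = frozenset({
--     "/auth/google/start",
--     "/auth/google/callback",
--     "/auth/revoke",
--     "/agent/schedule",
--     "/agent/email",
--     "/auth/microsoft/start",
--     "/auth/microsoft/callback",
--     "/auth/microsoft/revoke",
--     "/auth/microsoft/save-config",
-- })
--
-- _STANDARD = frozenset({
--     "/calls",
--     "/calls/batch",
--     "/ui/sessions",
--     "/auth/microsoft/list-businesses",
--     "/auth/microsoft/list-services",
-- })
--
--
-- def _get_endpoint_tier(path: str) -> str:
--     """Determine the rate limit tier for a given endpoint path."""
--     if path in _SENSITIVE: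
--         return "sensitive"
--     if path in _STANDARD:
--         return "standard"
--     return "high"
-- ===== Notes on version B (the rewrite author's own statement) =====
-- stated objective: simpler
-- what changed: Replaced the dict walk (exact lookup plus two prefix-scan loops) with a two-set membership chain defaulting to "high": the prefix loops are dead for the default because the first key "/" (and its rstrip to "") maps every non-exact path to "high", so only the sensitive and standard exact keys matter.
import Mathlib
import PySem

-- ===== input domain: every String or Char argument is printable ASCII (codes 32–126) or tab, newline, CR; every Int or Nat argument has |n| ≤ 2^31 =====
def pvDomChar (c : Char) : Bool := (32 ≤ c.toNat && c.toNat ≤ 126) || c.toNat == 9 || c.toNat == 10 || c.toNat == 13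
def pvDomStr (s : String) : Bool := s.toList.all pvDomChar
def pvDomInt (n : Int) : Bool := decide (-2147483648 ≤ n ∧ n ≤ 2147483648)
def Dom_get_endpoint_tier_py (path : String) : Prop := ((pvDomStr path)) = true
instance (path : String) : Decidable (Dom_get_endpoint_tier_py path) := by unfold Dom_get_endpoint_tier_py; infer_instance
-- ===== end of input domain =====

-- B replaces A's dict walk (exact lookup + two prefix-scan loops, dead for the default)
-- by a membership chain over two sets (sensitive, standard) defaulting to "high" — simpler.

-- ===== PORT A =====
-- the module constant ENDPOINT_TIERS; the dict literal has 21 distinct keys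
def pvENDPOINT_TIERS : PySem.Dict String String := PySem.Dict.mk [
  ("/", "high"),
  ("/healthz", "high"),
  ("/security/status", "high"),
  ("/recordings/signed-url", "high"),
  ("/recordings/calls/", "high"),
  ("/auth/status", "high"),
  ("/auth/microsoft/status", "high"),
  ("/calls", "standard"),
  ("/calls/batch", "standard"),
  ("/ui/sessions", "standard"),
  ("/auth/microsoft/list-businesses", "standard"),
  ("/auth/microsoft/list-services", "standard"),
  ("/auth/google/start", "sensitive"),
  ("/auth/google/callback", "sensitive"),
  ("/auth/revoke", "sensitive"),
  ("/agent/schedule", "sensitive"),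
  ("/agent/email", "sensitive"),
  ("/auth/microsoft/start", "sensitive"),
  ("/auth/microsoft/callback", "sensitive"),
  ("/auth/microsoft/revoke", "sensitive"),
  ("/auth/microsoft/save-config", "sensitive")]

-- s.rstrip("/") for the one-character strip set "/" (PySem has no rstrip-with-chars); exact
def pvRstripSlash (s : String) : String :=
  String.ofList ((s.toList.reverse.dropWhile (· == '/')).reverse)

-- 'for prefix, tier in …items(): if prefix.endswith("/") and path.startswith(prefix): return tier'
def pvLoop1 : List (String × String) → String → Option String
  | [], _ => none
  | (pre, tier) :: rest, path =>
      if PySem.Str.endswith pre "/" && PySem.Str.startswith path pre then some tier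
      else pvLoop1 rest path

-- 'for prefix, tier in …items(): if path.startswith(prefix.rstrip("/")): return tier'
def pvLoop2 : List (String × String) → String → Option String
  | [], _ => none
  | (pre, tier) :: rest, path =>
      if PySem.Str.startswith path (pvRstripSlash pre) then some tier
      else pvLoop2 rest path

def get_endpoint_tier_py (path : String) : String :=
  if pvENDPOINT_TIERS.contains path then
    (pvENDPOINT_TIERS.get? path).getD "standard"  -- 'ENDPOINT_TIERS[path]'; key present, so getD never defaults
  else
    match pvLoop1 pvENDPOINT_TIERS.items path with
    | some tier => tier
    | none =>
      match pvLoop2 pvENDPOINT_TIERS.items path with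
      | some tier => tier
      | none => "standard"

-- ===== PORT B =====
-- the module constants _SENSITIVE and _STANDARD (Python frozensets)
def pvSENSITIVE : PySem.Set String := PySem.Set.ofList [
  "/auth/google/start",
  "/auth/google/callback",
  "/auth/revoke",
  "/agent/schedule",
  "/agent/email",
  "/auth/microsoft/start",
  "/auth/microsoft/callback",
  "/auth/microsoft/revoke",
  "/auth/microsoft/save-config"]

def pvSTANDARD : PySem.Set String := PySem.Set.ofList [
  "/calls",
  "/calls/batch",
  "/ui/sessions",
  "/auth/microsoft/list-businesses",
  "/auth/microsoft/list-services"]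

def get_endpoint_tier_py_alt (path : String) : String :=
  if PySem.Set.contains pvSENSITIVE path then "sensitive"
  else if PySem.Set.contains pvSTANDARD path then "standard"
  else "high"

-- ===== PRECONDITION & SPEC =====
def Spec_get_endpoint_tier_py (path : String) (out : String) : Prop := out = get_endpoint_tier_py_alt path
instance (path : String) (out : String) : Decidable (Spec_get_endpoint_tier_py path out) := by unfold Spec_get_endpoint_tier_py; infer_instance

-- ===== CLAIM (what is proved, stated in full; the proofs are below) =====
def Claim_equal_get_endpoint_tier_py : Prop := ∀ (path : String), Dom_get_endpoint_tier_py path → Spec_get_endpoint_tier_py path (get_endpoint_tier_py path)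

-- ===== LEMMAS AND PROOFS =====

-- every key of the dict gets the same tier from B as the dict stores
theorem pv_alt_on_keys : ∀ p ∈ pvENDPOINT_TIERS.items, get_endpoint_tier_py_alt p.1 = p.2 := by
  decide

-- every member of either of B's sets is a key of A's dict
theorem pv_sets_are_keys :
    (∀ x ∈ pvSENSITIVE, pvENDPOINT_TIERS.contains x = true) ∧
    (∀ x ∈ pvSTANDARD, pvENDPOINT_TIERS.contains x = true) := by
  decide

-- on a non-key path, B returns "high"
theorem pv_alt_of_not_key (path : String)
    (hc : pvENDPOINT_TIERS.contains path = false) :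
    get_endpoint_tier_py_alt path = "high" := by
  unfold get_endpoint_tier_py_alt
  have h1 : PySem.Set.contains pvSENSITIVE path = false := by
    cases h : PySem.Set.contains pvSENSITIVE path with
    | false => rfl
    | true =>
      exfalso
      have := pv_sets_are_keys.1 path ((PySem.Set.contains_iff _ _).mp h)
      rw [hc] at this; exact Bool.false_ne_true this
  have h2 : PySem.Set.contains pvSTANDARD path = false := by
    cases h : PySem.Set.contains pvSTANDARD path with
    | false => rfl
    | true =>
      exfalso
      have := pv_sets_are_keys.2 path ((PySem.Set.contains_iff _ _).mp h)
      rw [hc] at this; exact Bool.false_ne_true this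
  rw [h1, h2]; rfl

-- a path that does not start with "/" does not start with "/recordings/calls/" either
theorem pv_no_slash_prefix (path : String)
    (hs : PySem.Str.startswith path "/" = false) :
    PySem.Str.startswith path "/recordings/calls/" = false := by
  cases hp : PySem.Str.startswith path "/recordings/calls/" with
  | false => rfl
  | true =>
    exfalso
    rw [PySem.Str.startswith_eq, PySem.Chars.startswith_iff] at hp
    have h1 : ("/".toList <+: path.toList) := List.IsPrefix.trans (by decide) hp
    rw [← PySem.Chars.startswith_iff, ← PySem.Str.startswith_eq] at h1
    rw [hs] at h1
    exact Bool.false_ne_true h1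

-- the 1st prefix loop: the very first entry ("/", "high") catches any path starting with "/"
theorem pv_loop1_of_slash (path : String)
    (hs : PySem.Str.startswith path "/" = true) :
    pvLoop1 pvENDPOINT_TIERS.items path = some "high" := by
  simp only [PySem.Str.startswith_eq] at hs
  have hs' : PySem.Chars.startswith path.toList ['/'] = true := hs
  simp [pvENDPOINT_TIERS, pvLoop1, hs',
    show PySem.Chars.endswith ['/'] ['/'] = true from by decide]

-- the 1st prefix loop finds nothing when path does not start with "/" …
theorem pv_loop1_of_no_slash (path : String)
    (hs : PySem.Str.startswith path "/" = false) :
    pvLoop1 pvENDPOINT_TIERS.items path = none := by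
  have h2 := pv_no_slash_prefix path hs
  simp only [PySem.Str.startswith_eq] at hs h2
  have hs' : PySem.Chars.startswith path.toList ['/'] = false := hs
  have h2' : PySem.Chars.startswith path.toList ['/', 'r', 'e', 'c', 'o', 'r', 'd', 'i', 'n', 'g', 's', '/', 'c', 'a', 'l', 'l', 's', '/'] = false := h2
  simp [pvENDPOINT_TIERS, pvLoop1, hs', h2',
    show PySem.Chars.endswith ['/', 'h', 'e', 'a', 'l', 't', 'h', 'z'] ['/'] = false from by decide,
    show PySem.Chars.endswith ['/', 's', 'e', 'c', 'u', 'r', 'i', 't', 'y', '/', 's', 't', 'a', 't', 'u', 's'] ['/'] = false from by decide,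
    show PySem.Chars.endswith ['/', 'r', 'e', 'c', 'o', 'r', 'd', 'i', 'n', 'g', 's', '/', 's', 'i', 'g', 'n', 'e', 'd', '-', 'u', 'r', 'l'] ['/'] = false from by decide,
    show PySem.Chars.endswith ['/', 'a', 'u', 't', 'h', '/', 's', 't', 'a', 't', 'u', 's'] ['/'] = false from by decide,
    show PySem.Chars.endswith ['/', 'a', 'u', 't', 'h', '/', 'm', 'i', 'c', 'r', 'o', 's', 'o', 'f', 't', '/', 's', 't', 'a', 't', 'u', 's'] ['/'] = false from by decide,
    show PySem.Chars.endswith ['/', 'c', 'a', 'l', 'l', 's'] ['/'] = false from by decide,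
    show PySem.Chars.endswith ['/', 'c', 'a', 'l', 'l', 's', '/', 'b', 'a', 't', 'c', 'h'] ['/'] = false from by decide,
    show PySem.Chars.endswith ['/', 'u', 'i', '/', 's', 'e', 's', 's', 'i', 'o', 'n', 's'] ['/'] = false from by decide,
    show PySem.Chars.endswith ['/', 'a', 'u', 't', 'h', '/', 'm', 'i', 'c', 'r', 'o', 's', 'o', 'f', 't', '/', 'l', 'i', 's', 't', '-', 'b', 'u', 's', 'i', 'n', 'e', 's', 's', 'e', 's'] ['/'] = false from by decide,
    show PySem.Chars.endswith ['/', 'a', 'u', 't', 'h', '/', 'm', 'i', 'c', 'r', 'o', 's', 'o', 'f', 't', '/', 'l', 'i', 's', 't', '-', 's', 'e', 'r', 'v', 'i', 'c', 'e', 's'] ['/'] = false from by decide,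
    show PySem.Chars.endswith ['/', 'a', 'u', 't', 'h', '/', 'g', 'o', 'o', 'g', 'l', 'e', '/', 's', 't', 'a', 'r', 't'] ['/'] = false from by decide,
    show PySem.Chars.endswith ['/', 'a', 'u', 't', 'h', '/', 'g', 'o', 'o', 'g', 'l', 'e', '/', 'c', 'a', 'l', 'l', 'b', 'a', 'c', 'k'] ['/'] = false from by decide,
    show PySem.Chars.endswith ['/', 'a', 'u', 't', 'h', '/', 'r', 'e', 'v', 'o', 'k', 'e'] ['/'] = false from by decide,
    show PySem.Chars.endswith ['/', 'a', 'g', 'e', 'n', 't', '/', 's', 'c', 'h', 'e', 'd', 'u', 'l', 'e'] ['/'] = false from by decide,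
    show PySem.Chars.endswith ['/', 'a', 'g', 'e', 'n', 't', '/', 'e', 'm', 'a', 'i', 'l'] ['/'] = false from by decide,
    show PySem.Chars.endswith ['/', 'a', 'u', 't', 'h', '/', 'm', 'i', 'c', 'r', 'o', 's', 'o', 'f', 't', '/', 's', 't', 'a', 'r', 't'] ['/'] = false from by decide,
    show PySem.Chars.endswith ['/', 'a', 'u', 't', 'h', '/', 'm', 'i', 'c', 'r', 'o', 's', 'o', 'f', 't', '/', 'c', 'a', 'l', 'l', 'b', 'a', 'c', 'k'] ['/'] = false from by decide,
    show PySem.Chars.endswith ['/', 'a', 'u', 't', 'h', '/', 'm', 'i', 'c', 'r', 'o', 's', 'o', 'f', 't', '/', 'r', 'e', 'v', 'o', 'k', 'e'] ['/'] = false from by decide,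
    show PySem.Chars.endswith ['/', 'a', 'u', 't', 'h', '/', 'm', 'i', 'c', 'r', 'o', 's', 'o', 'f', 't', '/', 's', 'a', 'v', 'e', '-', 'c', 'o', 'n', 'f', 'i', 'g'] ['/'] = false from by decide]

-- … and then the 2nd loop's first entry ("/".rstrip("/") = "") catches everything
theorem pv_loop2_first (path : String) :
    pvLoop2 pvENDPOINT_TIERS.items path = some "high" := by
  simp [pvENDPOINT_TIERS, pvLoop2, show pvRstripSlash "/" = "" from by decide,
    PySem.Chars.startswith]

-- ===== VERDICT (by name: the statement is the Claim_ definition above) =====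
theorem get_endpoint_tier_py_spec : Claim_equal_get_endpoint_tier_py := by
  intro path _
  unfold Spec_get_endpoint_tier_py get_endpoint_tier_py
  by_cases hc : pvENDPOINT_TIERS.contains path = true
  · rw [if_pos hc]
    rw [PySem.Dict.contains_eq_isSome_get?] at hc
    cases hg : pvENDPOINT_TIERS.get? path with
    | none => rw [hg] at hc; simp at hc
    | some t =>
      have hmem := PySem.Dict.mem_items_of_get?_eq_some _ hg
      have := pv_alt_on_keys (path, t) hmem
      simp only [Option.getD_some]
      exact this.symm
  · rw [Bool.not_eq_true] at hc
    rw [if_neg (by simp [hc]), pv_alt_of_not_key path hc]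
    by_cases hs : PySem.Str.startswith path "/" = true
    · rw [pv_loop1_of_slash path hs]
    · rw [Bool.not_eq_true] at hs
      rw [pv_loop1_of_no_slash path hs, pv_loop2_first path]
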